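-- pv_equiv track=rewrite | github.com/maksymalist/Python-Algorithms | dfs/remove_not_edge.py | solution
-- ===== SOURCE A (Python) =====
-- def solution(mat):
--
--     visited = [[0 for x in range(len(mat[0]))] for y in range(len(mat))]
--
--
--     def dfs(x,y):
--
--         if visited[y][x] == 1 or mat[y][x] == 0:
--             return
--
--
--         visited[y][x] = 1
--
--
--         if x > 0:
--             dfs(x-1,y)
--         if x < len(mat[0])-1:
--             dfs(x+1,y)
--         if y > 0:
--             dfs(x,y-1)
--         if y < len(mat)-1:
--             dfs(x,y+1)
--
--
--
--
--
--
--     for y, row in enumerate(mat):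
--         for x, val in enumerate(row):
--             # check if part of perimeter
--             if val == 1 and y == 0 or y == len(mat) - 1 or x == 0 or x == len(mat[0]) - 1:
--                 dfs(x, y)
--
--     return visited
-- ===== SOURCE B (Python) =====
-- def solution(mat):
--     rows, cols = len(mat), len(mat[0])
--     seen = set()
--     stack = [(x, y)
--              for y, row in enumerate(mat)
--              for x, val in enumerate(row)
--              if val == 1 and y == 0 or y == rows - 1 or x == 0 or x == cols - 1]
--     # reversed so the seeds pop in row-major order, matching A's seed order
--     stack.reverse()
--     while stack:
--         x, y = stack.pop()
--         if (x, y) in seen or mat[y][x] == 0: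
--             continue
--         seen.add((x, y))
--         for nx, ny in ((x, y + 1), (x, y - 1), (x + 1, y), (x - 1, y)):
--             if 0 <= nx < cols and 0 <= ny < rows:
--                 stack.append((nx, ny))
--     return [[1 if (x, y) in seen else 0 for x in range(cols)] for y in range(rows)]
-- ===== Notes on version B (the rewrite author's own statement) =====
-- stated objective: alternative
-- what changed: The recursive dfs mutating a visited grid through the Python call stack is replaced by an explicit worklist stack plus a SET of seen coordinates: seeds are collected by one comprehension, a while/pop loop grows the set, and the visited grid is rendered from the set only at the end.
-- outside the precondition, e.g. on solution([]): A returns [], B raises IndexError; on solution([[0, 0], [0]]): A returns [[0, 0], [0, 0]], B returns [[0, 0], [0, 0]]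
import Mathlib
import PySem

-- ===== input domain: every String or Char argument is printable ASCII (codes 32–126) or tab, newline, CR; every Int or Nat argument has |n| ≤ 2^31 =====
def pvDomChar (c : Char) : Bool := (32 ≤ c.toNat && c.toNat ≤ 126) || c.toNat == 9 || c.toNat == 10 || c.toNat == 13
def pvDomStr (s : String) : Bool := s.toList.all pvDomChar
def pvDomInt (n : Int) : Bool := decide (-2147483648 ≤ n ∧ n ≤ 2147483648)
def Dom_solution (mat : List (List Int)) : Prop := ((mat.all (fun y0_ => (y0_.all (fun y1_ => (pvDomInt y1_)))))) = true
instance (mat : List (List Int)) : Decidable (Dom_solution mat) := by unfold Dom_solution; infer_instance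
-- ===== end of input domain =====

-- B replaces A's recursive dfs on a mutable visited grid by an explicit worklist
-- stack plus a SET of seen coordinates, rendering the grid from the set at the
-- end; equal results proved on nonempty rectangular matrices.

-- ===== PORT A =====

-- visited[y][x] / mat[y][x]; exact for the non-negative in-range reads the
-- Python programs actually perform under Pre_solution.
def pvGet (v : List (List Int)) (y x : Int) : Int :=
  PySem.List.pyGetD (PySem.List.pyGetD v y []) x 0

-- visited[y][x] = 1; exact for the non-negative in-range assignments A's
-- Python actually performs under Pre_solution.
def pvSet (v : List (List Int)) (y x : Int) : List (List Int) :=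
  v.set y.toNat ((PySem.List.pyGetD v y []).set x.toNat 1)

-- A's recursive dfs; the fuel argument is only a termination device, the top
-- call passes rows*cols+1, which is provably sufficient (each productive
-- recursion level marks a fresh cell).
def pvDfsA (mat : List (List Int)) (rows cols : Int) :
    Nat → Int → Int → List (List Int) → List (List Int)
  | 0, _, _, v => v
  | fuel+1, x, y, v =>
    if pvGet v y x = 1 ∨ pvGet mat y x = 0 then v
    else
      let v1 := pvSet v y x
      let v2 := if 0 < x then pvDfsA mat rows cols fuel (x-1) y v1 else v1
      let v3 := if x < cols - 1 then pvDfsA mat rows cols fuel (x+1) y v2 else v2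
      let v4 := if 0 < y then pvDfsA mat rows cols fuel x (y-1) v3 else v3
      if y < rows - 1 then pvDfsA mat rows cols fuel x (y+1) v4 else v4

def solution (mat : List (List Int)) : List (List Int) :=
  let rows : Int := PySem.List.len mat
  let cols : Int := PySem.List.len (PySem.List.pyGetD mat 0 [])
  let visited := (PySem.List.pyRange 0 rows 1).map
    (fun _ => (PySem.List.pyRange 0 cols 1).map (fun _ => (0 : Int)))
  (PySem.List.enumerate mat).foldl (fun v yrow =>
    (PySem.List.enumerate yrow.2).foldl (fun v xval =>
      -- Python's  val == 1 and y == 0 or y == rows-1 or x == 0 or x == cols-1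
      if (xval.2 = 1 ∧ yrow.1 = 0) ∨ yrow.1 = rows - 1 ∨ xval.1 = 0 ∨ xval.1 = cols - 1
      then pvDfsA mat rows cols (rows.toNat * cols.toNat + 1) xval.1 yrow.1 v
      else v) v) visited

-- ===== PORT B =====

-- the final list comprehension of Source B: the 0/1 grid rendered from the seen set
def renderS (rows cols : Int) (seen : List (Int × Int)) : List (List Int) :=
  (PySem.List.pyRange 0 rows 1).map (fun y =>
    (PySem.List.pyRange 0 cols 1).map (fun x => if (x, y) ∈ seen then (1 : Int) else 0))

-- the while/pop loop of Source B; the Lean list holds the stack TOP-FIRST (Python's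
-- list.pop() takes the last element), so pop = head and append = cons, and the
-- Python stack after stack.reverse() is the seed list itself.  The fuel
-- argument is only a termination device; the passed bound is provably enough.
def pvLoopB (mat : List (List Int)) (rows cols : Int) :
    Nat → List (Int × Int) → List (Int × Int) → List (Int × Int)
  | 0, _, s => s
  | _+1, [], s => s
  | fuel+1, (x, y) :: st, s =>
    if (x, y) ∈ s ∨ pvGet mat y x = 0 then pvLoopB mat rows cols fuel st s
    else
      let s1 := PySem.Set.add s (x, y)
      -- for nx, ny in ((x,y+1),(x,y-1),(x+1,y),(x-1,y)): if in bounds: push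
      let st1 := [(x, y+1), (x, y-1), (x+1, y), (x-1, y)].foldl
        (fun st p => if 0 ≤ p.1 ∧ p.1 < cols ∧ 0 ≤ p.2 ∧ p.2 < rows then p :: st else st) st
      pvLoopB mat rows cols fuel st1 s1

def solution_alt (mat : List (List Int)) : List (List Int) :=
  let rows : Int := PySem.List.len mat
  let cols : Int := PySem.List.len (PySem.List.pyGetD mat 0 [])
  let seeds := (PySem.List.enumerate mat).flatMap (fun yrow =>
    ((PySem.List.enumerate yrow.2).filter (fun xval =>
      decide ((xval.2 = 1 ∧ yrow.1 = 0) ∨ yrow.1 = rows - 1 ∨ xval.1 = 0 ∨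
        xval.1 = cols - 1))).map (fun xval => (xval.1, yrow.1)))
  let seen := pvLoopB mat rows cols (seeds.length + 5 * (rows.toNat * cols.toNat) + 1)
    seeds (PySem.Set.empty : PySem.Set (Int × Int))
  renderS rows cols seen

-- ===== PRECONDITION & SPEC =====

-- Pre_ excludes the empty matrix (A returns [] only because len(mat[0]) is
-- never evaluated there, while B evaluates it and raises IndexError) and
-- ragged matrices: the flood fill indexes every row at positions up to
-- len(mat[0])-1, which raises IndexError on most ragged inputs, and the few
-- ragged inputs that do return do so only because the fill happens not to
-- probe any out-of-range cell.
def Pre_solution (mat : List (List Int)) : Prop :=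
  mat ≠ [] ∧ ∀ r ∈ mat, r.length = (mat.headD []).length
instance (mat : List (List Int)) : Decidable (Pre_solution mat) := by
  unfold Pre_solution; infer_instance

def pvWitness_solution : List (List Int) := [[1, 0], [0, 1]]

def Spec_solution (mat : List (List Int)) (out : List (List Int)) : Prop := out = solution_alt mat
instance (mat : List (List Int)) (out : List (List Int)) : Decidable (Spec_solution mat out) := by unfold Spec_solution; infer_instance

-- ===== CLAIM (what is proved, stated in full; the proofs are below) =====
def Claim_equal_solution : Prop := ∀ (mat : List (List Int)), Dom_solution mat → Pre_solution mat → Spec_solution mat (solution mat)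

-- ===== LEMMAS AND PROOFS =====

-- number of non-1 entries of a row / of the visited grid: marking an
-- unvisited in-range cell strictly decreases it, which makes the chosen fuels
-- sufficient
def rowNon (r : List Int) : Nat := r.countP (fun a => a ≠ 1)
def nonOnes (v : List (List Int)) : Nat := (v.map rowNon).sum

-- shape invariant of A's `visited`
def GoodV (R C : Nat) (v : List (List Int)) : Prop :=
  v.length = R ∧ ∀ r ∈ v, r.length = C

-- the canonical ("enough fuel") dfs
def dfsT (mat : List (List Int)) (rows cols : Int) (x y : Int) (v : List (List Int)) :
    List (List Int) :=
  pvDfsA mat rows cols (nonOnes v + 1) x y v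

lemma rowNon_cons (a : Int) (r : List Int) :
    rowNon (a :: r) = rowNon r + (if a = 1 then 0 else 1) := by
  by_cases ha : a = 1 <;> simp [rowNon, ha]

lemma nonOnes_cons (r : List Int) (v : List (List Int)) :
    nonOnes (r :: v) = rowNon r + nonOnes v := by
  simp [nonOnes]

lemma rowNon_le_length (r : List Int) : rowNon r ≤ r.length :=
  List.countP_le_length

lemma rowNon_set_le : ∀ (j : Nat) (r : List Int), rowNon (r.set j 1) ≤ rowNon r := by
  intro j r
  induction r generalizing j with
  | nil => simp
  | cons a r ih =>
    cases j with
    | zero =>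
      rw [List.set_cons_zero, rowNon_cons, rowNon_cons]
      simp
    | succ j =>
      rw [List.set_cons_succ, rowNon_cons, rowNon_cons]
      have := ih j
      omega

lemma rowNon_set_lt : ∀ (j : Nat) (r : List Int), j < r.length → r.getD j 0 ≠ 1 →
    rowNon (r.set j 1) < rowNon r := by
  intro j r
  induction r generalizing j with
  | nil => intro h _; simp at h
  | cons a r ih =>
    intro h hne
    cases j with
    | zero =>
      rw [List.getD_cons_zero] at hne
      rw [List.set_cons_zero, rowNon_cons, rowNon_cons]
      simp [hne]
    | succ j =>
      rw [List.getD_cons_succ] at hne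
      rw [List.set_cons_succ, rowNon_cons, rowNon_cons]
      have := ih j (by simpa using h) hne
      omega

lemma nonOnes_set_le : ∀ (i : Nat) (r' : List Int) (v : List (List Int)),
    rowNon r' ≤ rowNon (v.getD i []) → nonOnes (v.set i r') ≤ nonOnes v := by
  intro i r' v
  induction v generalizing i with
  | nil => intro _; simp
  | cons a v ih =>
    intro h
    cases i with
    | zero =>
      rw [List.getD_cons_zero] at h
      rw [List.set_cons_zero, nonOnes_cons, nonOnes_cons]
      omega
    | succ i =>
      rw [List.getD_cons_succ] at h
      rw [List.set_cons_succ, nonOnes_cons, nonOnes_cons]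
      have := ih i h
      omega

lemma nonOnes_set_lt : ∀ (i : Nat) (r' : List Int) (v : List (List Int)),
    i < v.length → rowNon r' < rowNon (v.getD i []) → nonOnes (v.set i r') < nonOnes v := by
  intro i r' v
  induction v generalizing i with
  | nil => intro h _; simp at h
  | cons a v ih =>
    intro h hlt
    cases i with
    | zero =>
      rw [List.getD_cons_zero] at hlt
      rw [List.set_cons_zero, nonOnes_cons, nonOnes_cons]
      omega
    | succ i =>
      rw [List.getD_cons_succ] at hlt
      rw [List.set_cons_succ, nonOnes_cons, nonOnes_cons]
      have := ih i (by simpa using h) hlt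
      omega

lemma pyGetD_toNat {α : Type} (xs : List α) (i : Int) (d : α) (h : 0 ≤ i) :
    PySem.List.pyGetD xs i d = xs.getD i.toNat d := by
  have hi : i = ((i.toNat : Nat) : Int) := (Int.toNat_of_nonneg h).symm
  rw [hi, PySem.List.pyGetD_natCast, Int.toNat_natCast]

lemma pvGet_eq (v : List (List Int)) (y x : Int) (hy : 0 ≤ y) (hx : 0 ≤ x) :
    pvGet v y x = (v.getD y.toNat []).getD x.toNat 0 := by
  unfold pvGet
  rw [pyGetD_toNat _ _ _ hy, pyGetD_toNat _ _ _ hx]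

lemma pvSet_eq (v : List (List Int)) (y x : Int) (hy : 0 ≤ y) :
    pvSet v y x = v.set y.toNat ((v.getD y.toNat []).set x.toNat 1) := by
  unfold pvSet
  rw [pyGetD_toNat _ _ _ hy]

lemma good_row_len {R C : Nat} {v : List (List Int)} (hg : GoodV R C v) {i : Nat}
    (hi : i < v.length) : (v.getD i []).length = C := by
  have hm : v.getD i [] ∈ v := by
    rw [List.getD_eq_getElem _ _ hi]
    exact List.getElem_mem hi
  exact hg.2 _ hm

lemma pvSet_good {R C : Nat} {v : List (List Int)} (hg : GoodV R C v) (y x : Int)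
    (hy : 0 ≤ y) : GoodV R C (pvSet v y x) := by
  rw [pvSet_eq v y x hy]
  by_cases hlt : y.toNat < v.length
  · refine ⟨by simp [hg.1], ?_⟩
    intro r hr
    rcases List.mem_or_eq_of_mem_set hr with h | h
    · exact hg.2 r h
    · rw [h, List.length_set]
      exact good_row_len hg hlt
  · rw [List.set_eq_of_length_le (Nat.le_of_not_lt hlt)]
    exact hg

lemma pvSet_nonOnes_le (v : List (List Int)) (y x : Int) (hy : 0 ≤ y) :
    nonOnes (pvSet v y x) ≤ nonOnes v := by
  rw [pvSet_eq v y x hy]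
  exact nonOnes_set_le _ _ _ (rowNon_set_le _ _)

lemma pvSet_nonOnes_lt (v : List (List Int)) (y x : Int) (hy : 0 ≤ y) (hx : 0 ≤ x)
    (hylt : y.toNat < v.length) (hxlt : x.toNat < (v.getD y.toNat []).length)
    (hne : pvGet v y x ≠ 1) : nonOnes (pvSet v y x) < nonOnes v := by
  rw [pvGet_eq v y x hy hx] at hne
  rw [pvSet_eq v y x hy]
  exact nonOnes_set_lt _ _ _ hylt (rowNon_set_lt _ _ hxlt hne)

lemma mat_range {mat : List (List Int)} (hPre : Pre_solution mat) (x y : Int)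
    (hx : 0 ≤ x) (hy : 0 ≤ y) (hm : pvGet mat y x ≠ 0) :
    y.toNat < mat.length ∧ x.toNat < (mat.headD []).length := by
  rw [pvGet_eq mat y x hy hx] at hm
  by_cases hylt : y.toNat < mat.length
  · have hlen : (mat.getD y.toNat []).length = (mat.headD []).length := by
      have hmem : mat.getD y.toNat [] ∈ mat := by
        rw [List.getD_eq_getElem _ _ hylt]
        exact List.getElem_mem hylt
      exact hPre.2 _ hmem
    by_cases hxlt : x.toNat < (mat.getD y.toNat []).length
    · exact ⟨hylt, hlen ▸ hxlt⟩
    · exact absurd (List.getD_eq_default _ _ (Nat.le_of_not_lt hxlt)) hm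
  · exfalso
    apply hm
    rw [List.getD_eq_default _ _ (Nat.le_of_not_lt hylt)]
    simp

lemma nonOnes_le_of_good {R C : Nat} {v : List (List Int)} (hg : GoodV R C v) :
    nonOnes v ≤ R * C := by
  obtain ⟨hlen, hall⟩ := hg
  subst hlen
  induction v with
  | nil => simp [nonOnes]
  | cons a v ih =>
    rw [nonOnes_cons, List.length_cons, Nat.succ_mul]
    have h1 : rowNon a ≤ C := by
      rw [← hall a (by simp)]
      exact rowNon_le_length a
    have h2 := ih (fun r hr => hall r (by simp [hr]))
    omega

lemma dfsA_inv (mat : List (List Int)) (rows cols : Int) {R C : Nat} :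
    ∀ (f : Nat) (x y : Int) (v : List (List Int)), 0 ≤ x → 0 ≤ y → GoodV R C v →
      GoodV R C (pvDfsA mat rows cols f x y v) ∧
        nonOnes (pvDfsA mat rows cols f x y v) ≤ nonOnes v := by
  intro f
  induction f with
  | zero => intro x y v hx hy hg; simp only [pvDfsA]; exact ⟨hg, le_refl _⟩
  | succ f ih =>
    intro x y v hx hy hg
    simp only [pvDfsA]
    by_cases hskip : pvGet v y x = 1 ∨ pvGet mat y x = 0
    · simp only [if_pos hskip]; exact ⟨hg, le_refl _⟩
    · simp only [if_neg hskip]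
      have g1 : GoodV R C (pvSet v y x) := pvSet_good hg y x hy
      have n1 : nonOnes (pvSet v y x) ≤ nonOnes v := pvSet_nonOnes_le v y x hy
      set v1 := pvSet v y x with hv1
      have h2 : GoodV R C (if 0 < x then pvDfsA mat rows cols f (x-1) y v1 else v1) ∧
          nonOnes (if 0 < x then pvDfsA mat rows cols f (x-1) y v1 else v1) ≤ nonOnes v1 := by
        by_cases hc : 0 < x
        · simp only [if_pos hc]; exact ih (x-1) y v1 (by omega) hy g1
        · simp only [if_neg hc]; exact ⟨g1, le_refl _⟩
      set v2 := if 0 < x then pvDfsA mat rows cols f (x-1) y v1 else v1 with hv2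
      have h3 : GoodV R C (if x < cols - 1 then pvDfsA mat rows cols f (x+1) y v2 else v2) ∧
          nonOnes (if x < cols - 1 then pvDfsA mat rows cols f (x+1) y v2 else v2) ≤ nonOnes v2 := by
        by_cases hc : x < cols - 1
        · simp only [if_pos hc]; exact ih (x+1) y v2 (by omega) hy h2.1
        · simp only [if_neg hc]; exact ⟨h2.1, le_refl _⟩
      set v3 := if x < cols - 1 then pvDfsA mat rows cols f (x+1) y v2 else v2 with hv3
      have h4 : GoodV R C (if 0 < y then pvDfsA mat rows cols f x (y-1) v3 else v3) ∧
          nonOnes (if 0 < y then pvDfsA mat rows cols f x (y-1) v3 else v3) ≤ nonOnes v3 := by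
        by_cases hc : 0 < y
        · simp only [if_pos hc]; exact ih x (y-1) v3 hx (by omega) h3.1
        · simp only [if_neg hc]; exact ⟨h3.1, le_refl _⟩
      set v4 := if 0 < y then pvDfsA mat rows cols f x (y-1) v3 else v3 with hv4
      have h5 : GoodV R C (if y < rows - 1 then pvDfsA mat rows cols f x (y+1) v4 else v4) ∧
          nonOnes (if y < rows - 1 then pvDfsA mat rows cols f x (y+1) v4 else v4) ≤ nonOnes v4 := by
        by_cases hc : y < rows - 1
        · simp only [if_pos hc]; exact ih x (y+1) v4 hx (by omega) h4.1
        · simp only [if_neg hc]; exact ⟨h4.1, le_refl _⟩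
      exact ⟨h5.1, le_trans h5.2 (le_trans h4.2 (le_trans h3.2 (le_trans h2.2 n1)))⟩

-- in-range facts for the not-skipped case, shared by the fuel and loop lemmas
lemma notskip_facts {mat : List (List Int)} {R C : Nat} (hPre : Pre_solution mat)
    (hR : R = mat.length) (hC : C = (mat.headD []).length)
    {v : List (List Int)} (hg : GoodV R C v) {x y : Int} (hx : 0 ≤ x) (hy : 0 ≤ y)
    (hv1 : pvGet v y x ≠ 1) (hm : pvGet mat y x ≠ 0) :
    nonOnes (pvSet v y x) < nonOnes v := by
  obtain ⟨hylt, hxlt⟩ := mat_range hPre x y hx hy hm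
  have hyv : y.toNat < v.length := by rw [hg.1, hR]; exact hylt
  have hxv : x.toNat < (v.getD y.toNat []).length := by
    rw [good_row_len hg hyv, hC]; exact hxlt
  exact pvSet_nonOnes_lt v y x hy hx hyv hxv hv1

lemma dfsA_fuel (mat : List (List Int)) (rows cols : Int) {R C : Nat}
    (hPre : Pre_solution mat) (hR : R = mat.length) (hC : C = (mat.headD []).length) :
    ∀ (n f1 f2 : Nat) (x y : Int) (v : List (List Int)), nonOnes v ≤ n → GoodV R C v →
      0 ≤ x → 0 ≤ y → nonOnes v < f1 → nonOnes v < f2 →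
      pvDfsA mat rows cols f1 x y v = pvDfsA mat rows cols f2 x y v := by
  intro n
  induction n with
  | zero =>
    intro f1 f2 x y v hn hg hx hy hf1 hf2
    obtain ⟨a, rfl⟩ : ∃ a, f1 = a + 1 := ⟨f1 - 1, by omega⟩
    obtain ⟨b, rfl⟩ : ∃ b, f2 = b + 1 := ⟨f2 - 1, by omega⟩
    simp only [pvDfsA]
    by_cases hskip : pvGet v y x = 1 ∨ pvGet mat y x = 0
    · simp only [if_pos hskip]
    · push Not at hskip
      have := notskip_facts hPre hR hC hg hx hy hskip.1 hskip.2
      omega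
  | succ n ih =>
    intro f1 f2 x y v hn hg hx hy hf1 hf2
    obtain ⟨a, rfl⟩ : ∃ a, f1 = a + 1 := ⟨f1 - 1, by omega⟩
    obtain ⟨b, rfl⟩ : ∃ b, f2 = b + 1 := ⟨f2 - 1, by omega⟩
    simp only [pvDfsA]
    by_cases hskip : pvGet v y x = 1 ∨ pvGet mat y x = 0
    · simp only [if_pos hskip]
    · simp only [if_neg hskip]
      push Not at hskip
      have hdec : nonOnes (pvSet v y x) < nonOnes v :=
        notskip_facts hPre hR hC hg hx hy hskip.1 hskip.2
      have g1 : GoodV R C (pvSet v y x) := pvSet_good hg y x hy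
      set v1 := pvSet v y x with hv1
      have n1 : nonOnes v1 ≤ n := by omega
      -- stage 1
      have e2 : (if 0 < x then pvDfsA mat rows cols a (x-1) y v1 else v1)
          = (if 0 < x then pvDfsA mat rows cols b (x-1) y v1 else v1) := by
        by_cases hc : 0 < x
        · simp only [if_pos hc]
          exact ih a b (x-1) y v1 n1 g1 (by omega) hy (by omega) (by omega)
        · simp only [if_neg hc]
      rw [← e2]
      set v2 := if 0 < x then pvDfsA mat rows cols a (x-1) y v1 else v1 with hv2
      have h2 : GoodV R C v2 ∧ nonOnes v2 ≤ nonOnes v1 := by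
        rw [hv2]
        by_cases hc : 0 < x
        · simp only [if_pos hc]; exact dfsA_inv mat rows cols a (x-1) y v1 (by omega) hy g1
        · simp only [if_neg hc]; exact ⟨g1, le_refl _⟩
      -- stage 2
      have e3 : (if x < cols - 1 then pvDfsA mat rows cols a (x+1) y v2 else v2)
          = (if x < cols - 1 then pvDfsA mat rows cols b (x+1) y v2 else v2) := by
        by_cases hc : x < cols - 1
        · simp only [if_pos hc]
          exact ih a b (x+1) y v2 (by omega) h2.1 (by omega) hy (by omega) (by omega)
        · simp only [if_neg hc]
      rw [← e3]
      set v3 := if x < cols - 1 then pvDfsA mat rows cols a (x+1) y v2 else v2 with hv3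
      have h3 : GoodV R C v3 ∧ nonOnes v3 ≤ nonOnes v2 := by
        rw [hv3]
        by_cases hc : x < cols - 1
        · simp only [if_pos hc]; exact dfsA_inv mat rows cols a (x+1) y v2 (by omega) hy h2.1
        · simp only [if_neg hc]; exact ⟨h2.1, le_refl _⟩
      -- stage 3
      have e4 : (if 0 < y then pvDfsA mat rows cols a x (y-1) v3 else v3)
          = (if 0 < y then pvDfsA mat rows cols b x (y-1) v3 else v3) := by
        by_cases hc : 0 < y
        · simp only [if_pos hc]
          exact ih a b x (y-1) v3 (by omega) h3.1 hx (by omega) (by omega) (by omega)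
        · simp only [if_neg hc]
      rw [← e4]
      set v4 := if 0 < y then pvDfsA mat rows cols a x (y-1) v3 else v3 with hv4
      have h4 : GoodV R C v4 ∧ nonOnes v4 ≤ nonOnes v3 := by
        rw [hv4]
        by_cases hc : 0 < y
        · simp only [if_pos hc]; exact dfsA_inv mat rows cols a x (y-1) v3 hx (by omega) h3.1
        · simp only [if_neg hc]; exact ⟨h3.1, le_refl _⟩
      -- stage 4
      by_cases hc : y < rows - 1
      · simp only [if_pos hc]
        exact ih a b x (y+1) v4 (by omega) h4.1 hx (by omega) (by omega) (by omega)
      · simp only [if_neg hc]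

lemma dfsA_eq_dfsT (mat : List (List Int)) (rows cols : Int) {R C : Nat}
    (hPre : Pre_solution mat) (hR : R = mat.length) (hC : C = (mat.headD []).length)
    (f : Nat) (x y : Int) (v : List (List Int)) (hg : GoodV R C v)
    (hx : 0 ≤ x) (hy : 0 ≤ y) (hf : nonOnes v < f) :
    pvDfsA mat rows cols f x y v = dfsT mat rows cols x y v :=
  dfsA_fuel mat rows cols hPre hR hC (nonOnes v) f (nonOnes v + 1) x y v (le_refl _) hg hx hy hf
    (by omega)

lemma dfsT_inv (mat : List (List Int)) (rows cols : Int) {R C : Nat}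
    (x y : Int) (v : List (List Int)) (hx : 0 ≤ x) (hy : 0 ≤ y) (hg : GoodV R C v) :
    GoodV R C (dfsT mat rows cols x y v) ∧ nonOnes (dfsT mat rows cols x y v) ≤ nonOnes v :=
  dfsA_inv mat rows cols (nonOnes v + 1) x y v hx hy hg

-- ----- render lemmas: the seen set versus A's visited grid -----

lemma renderS_good (R C : Nat) (S : List (Int × Int)) :
    GoodV R C (renderS (R : Int) (C : Int) S) := by
  constructor
  · simp [renderS, PySem.List.length_pyRange_one]
  · intro r hr
    simp only [renderS, List.mem_map] at hr
    obtain ⟨y, _, rfl⟩ := hr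
    simp [PySem.List.length_pyRange_one]

lemma renderS_getElem (R C : Nat) (S : List (Int × Int)) (j : Nat)
    (h2 : j < (renderS (R : Int) (C : Int) S).length) :
    (renderS (R : Int) (C : Int) S)[j]
      = (PySem.List.pyRange 0 (C : Int) 1).map
          (fun x' => if (x', (j : Int)) ∈ S then (1 : Int) else 0) := by
  unfold renderS
  rw [List.getElem_map, PySem.List.getElem_pyRange_one]
  norm_num

lemma pvGet_renderS (R C : Nat) (S : List (Int × Int)) (x y : Int) (hx : 0 ≤ x) (hy : 0 ≤ y)
    (hIn : ∀ p ∈ S, 0 ≤ p.1 ∧ p.1 < (C : Int) ∧ 0 ≤ p.2 ∧ p.2 < (R : Int)) :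
    (pvGet (renderS (R : Int) (C : Int) S) y x = 1 ↔ (x, y) ∈ S) := by
  unfold pvGet renderS
  by_cases hyR : y < (R : Int)
  · rw [PySem.List.pyGetD_map_pyRange_of_nonneg _ _ _ _ hy hyR]
    by_cases hxC : x < (C : Int)
    · rw [PySem.List.pyGetD_map_pyRange_of_nonneg _ _ _ _ hx hxC]
      by_cases hmem : (x, y) ∈ S
      · simp [hmem]
      · simp [hmem]
    · rw [pyGetD_toNat _ _ _ hx, List.getD_eq_default]
      · constructor
        · intro h; exact absurd h (by norm_num)
        · intro h; exact absurd (hIn _ h).2.1 (by simpa using hxC)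
      · simp only [List.length_map, PySem.List.length_pyRange_one]
        omega
  · rw [pyGetD_toNat _ _ _ hy, List.getD_eq_default, pyGetD_toNat _ _ _ hx]
    · constructor
      · intro h; exact absurd h (by simp)
      · intro h; exact absurd (hIn _ h).2.2.2 (by simpa using hyR)
    · simp only [List.length_map, PySem.List.length_pyRange_one]
      omega

lemma pvSet_renderS (R C : Nat) (S : List (Int × Int)) (x y : Int)
    (hx : 0 ≤ x) (_hxC : x < (C : Int)) (hy : 0 ≤ y) (hyR : y < (R : Int)) :
    pvSet (renderS (R : Int) (C : Int) S) y x
      = renderS (R : Int) (C : Int) (PySem.Set.add S (x, y)) := by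
  rw [pvSet_eq _ _ _ hy]
  have hlenR : (renderS (R : Int) (C : Int) S).length = R := (renderS_good R C S).1
  have hyN : y.toNat < R := by omega
  apply List.ext_getElem
  · simp [List.length_set, hlenR, (renderS_good R C (PySem.Set.add S (x, y))).1]
  · intro j hj1 hj2
    rw [List.getElem_set, renderS_getElem R C (PySem.Set.add S (x, y)) j hj2]
    by_cases hjy : y.toNat = j
    · subst hjy
      rw [if_pos rfl]
      rw [List.getD_eq_getElem _ _ (by omega), renderS_getElem R C S y.toNat (by omega)]
      apply List.ext_getElem
      · simp
      · intro i hi1 hi2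
        rw [List.getElem_set]
        simp only [List.getElem_map, PySem.List.getElem_pyRange_one, zero_add]
        by_cases hix : x.toNat = i
        · rw [if_pos hix]
          rw [if_pos (show (((i : Nat) : Int), ((y.toNat : Nat) : Int)) ∈ PySem.Set.add S (x, y) by
            rw [PySem.Set.mem_add]; right; rw [Prod.mk.injEq]; constructor <;> omega)]
        · rw [if_neg hix]
          by_cases hmem : (((i : Nat) : Int), ((y.toNat : Nat) : Int)) ∈ S
          · rw [if_pos hmem, if_pos (by rw [PySem.Set.mem_add]; exact Or.inl hmem)]
          · rw [if_neg hmem, if_neg]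
            rw [PySem.Set.mem_add]
            rintro (h | h)
            · exact hmem h
            · rw [Prod.mk.injEq] at h
              have hix2 : ((i : Nat) : Int) = x := h.1
              omega
    · rw [if_neg hjy, renderS_getElem R C S j (by simpa using hj1)]
      have hne : ((j : Nat) : Int) ≠ y := fun h => hjy (by omega)
      apply List.map_congr_left
      intro a _
      by_cases hmem : (a, ((j : Nat) : Int)) ∈ S
      · rw [if_pos hmem, if_pos (by rw [PySem.Set.mem_add]; exact Or.inl hmem)]
      · rw [if_neg hmem, if_neg]
        rw [PySem.Set.mem_add]
        rintro (h | h)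
        · exact hmem h
        · rw [Prod.mk.injEq] at h
          exact hne h.2

-- ----- B's loop equals A's seed-by-seed dfs fold -----

lemma loopB_eq (mat : List (List Int)) {R C : Nat}
    (hPre : Pre_solution mat) (hR : R = mat.length) (hC : C = (mat.headD []).length) :
    ∀ (f : Nat) (st : List (Int × Int)) (S : List (Int × Int)),
      (∀ p ∈ st, 0 ≤ p.1 ∧ 0 ≤ p.2) →
      (∀ p ∈ S, 0 ≤ p.1 ∧ p.1 < (C : Int) ∧ 0 ≤ p.2 ∧ p.2 < (R : Int)) →
      st.length + 5 * nonOnes (renderS (R : Int) (C : Int) S) < f →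
      renderS (R : Int) (C : Int) (pvLoopB mat (R : Int) (C : Int) f st S)
        = st.foldl (fun v p => dfsT mat (R : Int) (C : Int) p.1 p.2 v)
            (renderS (R : Int) (C : Int) S) := by
  intro f
  induction f with
  | zero => intro st S _ _ h; omega
  | succ f ih =>
    intro st S hnn hIn hf
    match st with
    | [] => simp only [pvLoopB, List.foldl_nil]
    | (x, y) :: st =>
      have hxy : 0 ≤ x ∧ 0 ≤ y := hnn (x, y) (by simp)
      have hst : ∀ p ∈ st, 0 ≤ p.1 ∧ 0 ≤ p.2 := fun p hp => hnn p (by simp [hp])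
      have hget := pvGet_renderS R C S x y hxy.1 hxy.2 hIn
      set v := renderS (R : Int) (C : Int) S with hv
      have hgv : GoodV R C v := renderS_good R C S
      simp only [pvLoopB]
      by_cases hskip : (x, y) ∈ S ∨ pvGet mat y x = 0
      · rw [if_pos hskip, ih st S hst hIn (by rw [← hv]; simp at hf ⊢; omega)]
        have hskipA : pvGet v y x = 1 ∨ pvGet mat y x = 0 := by
          rcases hskip with h | h
          · exact Or.inl (hget.mpr h)
          · exact Or.inr h
        have hT : dfsT mat (R : Int) (C : Int) x y v = v := by
          unfold dfsT
          simp only [pvDfsA]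
          rw [if_pos hskipA]
        rw [List.foldl_cons, hT]
      · rw [if_neg hskip]
        push Not at hskip
        have hnotmem : (x, y) ∉ S := hskip.1
        have hmat : pvGet mat y x ≠ 0 := hskip.2
        have hget1 : pvGet v y x ≠ 1 := fun h => hnotmem (hget.mp h)
        obtain ⟨hyN, hxN⟩ := mat_range hPre x y hxy.1 hxy.2 hmat
        have hxC : x < (C : Int) := by omega
        have hyR : y < (R : Int) := by omega
        have hdec : nonOnes (pvSet v y x) < nonOnes v :=
          notskip_facts hPre hR hC hgv hxy.1 hxy.2 hget1 hmat
        have g1 : GoodV R C (pvSet v y x) := pvSet_good hgv y x hxy.2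
        have hrender1 : pvSet v y x
            = renderS (R : Int) (C : Int) (PySem.Set.add S (x, y)) :=
          pvSet_renderS R C S x y hxy.1 hxC hxy.2 hyR
        set v1 := pvSet v y x with hv1
        have hIn1 : ∀ p ∈ PySem.Set.add S (x, y),
            0 ≤ p.1 ∧ p.1 < (C : Int) ∧ 0 ≤ p.2 ∧ p.2 < (R : Int) := by
          intro p hp
          rw [PySem.Set.mem_add] at hp
          rcases hp with h | h
          · exact hIn p h
          · subst h; exact ⟨hxy.1, hxC, hxy.2, hyR⟩
        -- the pushed stack, matched with A's recursion order
        set st1 := if y < (R : Int) - 1 then (x, y+1) :: st else st with hst1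
        set st2 := if 0 < y then (x, y-1) :: st1 else st1 with hst2
        set st3 := if x < (C : Int) - 1 then (x+1, y) :: st2 else st2 with hst3
        set st4 := if 0 < x then (x-1, y) :: st3 else st3 with hst4
        have hpush : [(x, y+1), (x, y-1), (x+1, y), (x-1, y)].foldl
            (fun st p => if 0 ≤ p.1 ∧ p.1 < (C : Int) ∧ 0 ≤ p.2 ∧ p.2 < (R : Int)
              then p :: st else st) st = st4 := by
          simp only [List.foldl_cons, List.foldl_nil]
          have e1 : (if 0 ≤ x ∧ x < (C : Int) ∧ 0 ≤ y+1 ∧ y+1 < (R : Int)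
              then (x, y+1) :: st else st) = st1 := by
            rw [hst1]; split_ifs <;> first | rfl | omega
          rw [e1]
          have e2 : (if 0 ≤ x ∧ x < (C : Int) ∧ 0 ≤ y-1 ∧ y-1 < (R : Int)
              then (x, y-1) :: st1 else st1) = st2 := by
            rw [hst2]; split_ifs <;> first | rfl | omega
          rw [e2]
          have e3 : (if 0 ≤ x+1 ∧ x+1 < (C : Int) ∧ 0 ≤ y ∧ y < (R : Int)
              then (x+1, y) :: st2 else st2) = st3 := by
            rw [hst3]; split_ifs <;> first | rfl | omega
          rw [e3]
          rw [hst4]; split_ifs <;> first | rfl | omega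
        rw [hpush]
        have hlen1 : st1.length ≤ st.length + 1 := by
          rw [hst1]; by_cases hc : y < (R : Int) - 1 <;> simp [hc]
        have hlen2 : st2.length ≤ st.length + 2 := by
          rw [hst2]; by_cases hc : 0 < y <;> simp [hc] <;> omega
        have hlen3 : st3.length ≤ st.length + 3 := by
          rw [hst3]; by_cases hc : x < (C : Int) - 1 <;> simp [hc] <;> omega
        have hlen4 : st4.length ≤ st.length + 4 := by
          rw [hst4]; by_cases hc : 0 < x <;> simp [hc] <;> omega
        have hnn1 : ∀ p ∈ st1, 0 ≤ p.1 ∧ 0 ≤ p.2 := by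
          rw [hst1]; by_cases hc : y < (R : Int) - 1 <;> simp only [hc, ite_true, ite_false]
          · intro p hp
            rcases List.mem_cons.mp hp with h | h
            · subst h; exact ⟨hxy.1, by omega⟩
            · exact hst p h
          · exact hst
        have hnn2 : ∀ p ∈ st2, 0 ≤ p.1 ∧ 0 ≤ p.2 := by
          rw [hst2]; by_cases hc : 0 < y <;> simp only [hc, ite_true, ite_false]
          · intro p hp
            rcases List.mem_cons.mp hp with h | h
            · subst h; exact ⟨hxy.1, by omega⟩
            · exact hnn1 p h
          · exact hnn1
        have hnn3 : ∀ p ∈ st3, 0 ≤ p.1 ∧ 0 ≤ p.2 := by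
          rw [hst3]; by_cases hc : x < (C : Int) - 1 <;> simp only [hc, ite_true, ite_false]
          · intro p hp
            rcases List.mem_cons.mp hp with h | h
            · subst h; exact ⟨by omega, hxy.2⟩
            · exact hnn2 p h
          · exact hnn2
        have hnn4 : ∀ p ∈ st4, 0 ≤ p.1 ∧ 0 ≤ p.2 := by
          rw [hst4]; by_cases hc : 0 < x <;> simp only [hc, ite_true, ite_false]
          · intro p hp
            rcases List.mem_cons.mp hp with h | h
            · subst h; exact ⟨by omega, hxy.2⟩
            · exact hnn3 p h
          · exact hnn3
        have hflen : st4.length + 5 * nonOnes (renderS (R : Int) (C : Int) (PySem.Set.add S (x, y))) < f := by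
          rw [← hrender1]
          have h0 : st.length + 1 + 5 * nonOnes v < f + 1 := by simpa using hf
          omega
        rw [ih st4 (PySem.Set.add S (x, y)) hnn4 hIn1 hflen, ← hrender1]
        -- now unfold the canonical dfs on the right and walk the four pushes
        rw [List.foldl_cons]
        have hT : dfsT mat (R : Int) (C : Int) x y v
            = (fun w => if y < (R : Int) - 1 then pvDfsA mat (R : Int) (C : Int) (nonOnes v) x (y+1) w else w)
              ((fun w => if 0 < y then pvDfsA mat (R : Int) (C : Int) (nonOnes v) x (y-1) w else w)
              ((fun w => if x < (C : Int) - 1 then pvDfsA mat (R : Int) (C : Int) (nonOnes v) (x+1) y w else w)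
              ((fun w => if 0 < x then pvDfsA mat (R : Int) (C : Int) (nonOnes v) (x-1) y w else w) v1))) := by
          unfold dfsT
          simp only [pvDfsA]
          rw [if_neg (by push Not; exact ⟨hget1, hmat⟩)]
        rw [hT]
        -- stage 1: (x-1, y)
        have s1 : st4.foldl (fun v p => dfsT mat (R : Int) (C : Int) p.1 p.2 v) v1
            = st3.foldl (fun v p => dfsT mat (R : Int) (C : Int) p.1 p.2 v)
                ((fun w => if 0 < x then pvDfsA mat (R : Int) (C : Int) (nonOnes v) (x-1) y w else w) v1) := by
          rw [hst4]
          by_cases hc : 0 < x <;> simp only [hc, ite_true, ite_false, List.foldl_cons]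
          · rw [dfsA_eq_dfsT mat (R : Int) (C : Int) hPre hR hC (nonOnes v) (x-1) y v1 g1 (by omega) hxy.2
              (by omega)]
        set w2 := (fun w => if 0 < x then pvDfsA mat (R : Int) (C : Int) (nonOnes v) (x-1) y w else w) v1
          with hw2
        have h2 : GoodV R C w2 ∧ nonOnes w2 ≤ nonOnes v1 := by
          rw [hw2]
          by_cases hc : 0 < x <;> simp only [hc, ite_true, ite_false]
          · exact dfsA_inv mat (R : Int) (C : Int) (nonOnes v) (x-1) y v1 (by omega) hxy.2 g1
          · exact ⟨g1, le_refl _⟩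
        -- stage 2: (x+1, y)
        have s2 : st3.foldl (fun v p => dfsT mat (R : Int) (C : Int) p.1 p.2 v) w2
            = st2.foldl (fun v p => dfsT mat (R : Int) (C : Int) p.1 p.2 v)
                ((fun w => if x < (C : Int) - 1 then pvDfsA mat (R : Int) (C : Int) (nonOnes v) (x+1) y w else w) w2) := by
          rw [hst3]
          by_cases hc : x < (C : Int) - 1 <;> simp only [hc, ite_true, ite_false, List.foldl_cons]
          · rw [dfsA_eq_dfsT mat (R : Int) (C : Int) hPre hR hC (nonOnes v) (x+1) y w2 h2.1 (by omega) hxy.2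
              (by omega)]
        set w3 := (fun w => if x < (C : Int) - 1 then pvDfsA mat (R : Int) (C : Int) (nonOnes v) (x+1) y w else w) w2
          with hw3
        have h3 : GoodV R C w3 ∧ nonOnes w3 ≤ nonOnes w2 := by
          rw [hw3]
          by_cases hc : x < (C : Int) - 1 <;> simp only [hc, ite_true, ite_false]
          · exact dfsA_inv mat (R : Int) (C : Int) (nonOnes v) (x+1) y w2 (by omega) hxy.2 h2.1
          · exact ⟨h2.1, le_refl _⟩
        -- stage 3: (x, y-1)
        have s3 : st2.foldl (fun v p => dfsT mat (R : Int) (C : Int) p.1 p.2 v) w3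
            = st1.foldl (fun v p => dfsT mat (R : Int) (C : Int) p.1 p.2 v)
                ((fun w => if 0 < y then pvDfsA mat (R : Int) (C : Int) (nonOnes v) x (y-1) w else w) w3) := by
          rw [hst2]
          by_cases hc : 0 < y <;> simp only [hc, ite_true, ite_false, List.foldl_cons]
          · rw [dfsA_eq_dfsT mat (R : Int) (C : Int) hPre hR hC (nonOnes v) x (y-1) w3 h3.1 hxy.1 (by omega)
              (by omega)]
        set w4 := (fun w => if 0 < y then pvDfsA mat (R : Int) (C : Int) (nonOnes v) x (y-1) w else w) w3
          with hw4
        have h4 : GoodV R C w4 ∧ nonOnes w4 ≤ nonOnes w3 := by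
          rw [hw4]
          by_cases hc : 0 < y <;> simp only [hc, ite_true, ite_false]
          · exact dfsA_inv mat (R : Int) (C : Int) (nonOnes v) x (y-1) w3 hxy.1 (by omega) h3.1
          · exact ⟨h3.1, le_refl _⟩
        -- stage 4: (x, y+1)
        have s4 : st1.foldl (fun v p => dfsT mat (R : Int) (C : Int) p.1 p.2 v) w4
            = st.foldl (fun v p => dfsT mat (R : Int) (C : Int) p.1 p.2 v)
                ((fun w => if y < (R : Int) - 1 then pvDfsA mat (R : Int) (C : Int) (nonOnes v) x (y+1) w else w) w4) := by
          rw [hst1]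
          by_cases hc : y < (R : Int) - 1 <;> simp only [hc, ite_true, ite_false, List.foldl_cons]
          · rw [dfsA_eq_dfsT mat (R : Int) (C : Int) hPre hR hC (nonOnes v) x (y+1) w4 h4.1 hxy.1 (by omega)
              (by omega)]
        rw [s1, s2, s3, s4]

-- fold fusion: running the collected seed list through F equals running F
-- inline while collecting
lemma foldl_fuse {α β σ : Type} (F : σ → β → σ) (bld : α → List β → List β)
    (app : α → σ → σ) (hcompat : ∀ a acc s, (bld a acc).foldl F s = app a (acc.foldl F s)) :
    ∀ (l : List α) (acc : List β) (s : σ),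
      (l.foldl (fun acc a => bld a acc) acc).foldl F s
        = l.foldl (fun s a => app a s) (acc.foldl F s) := by
  intro l
  induction l with
  | nil => intro acc s; simp
  | cons a l ih => intro acc s; simp only [List.foldl_cons]; rw [ih, hcompat]

lemma foldl_filter_acc {α β σ : Type} (c : α → Prop) [DecidablePred c] (g : α → β)
    (F : σ → β → σ) :
    ∀ (l : List α) (acc : List β) (s : σ),
      (l.foldl (fun acc a => if c a then acc ++ [g a] else acc) acc).foldl F s
        = l.foldl (fun s a => if c a then F s (g a) else s) (acc.foldl F s) := by
  intro l
  induction l with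
  | nil => intro acc s; simp
  | cons a l ih =>
    intro acc s
    by_cases hc : c a
    · simp only [List.foldl_cons, if_pos hc]
      rw [ih, List.foldl_append]
      simp
    · simp only [List.foldl_cons, if_neg hc]
      rw [ih]

lemma foldl_dfs_congr (mat : List (List Int)) (rows cols : Int) {R C : Nat}
    (hPre : Pre_solution mat) (hR : R = mat.length) (hC : C = (mat.headD []).length)
    (fA : Nat) (hfA : R * C < fA) :
    ∀ (s : List (Int × Int)) (v : List (List Int)), GoodV R C v →
      (∀ p ∈ s, 0 ≤ p.1 ∧ 0 ≤ p.2) →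
      s.foldl (fun v p => pvDfsA mat rows cols fA p.1 p.2 v) v
        = s.foldl (fun v p => dfsT mat rows cols p.1 p.2 v) v := by
  intro s
  induction s with
  | nil => intro v _ _; rfl
  | cons p s ih =>
    intro v hg hnn
    have hp := hnn p (by simp)
    have hb : nonOnes v < fA := lt_of_le_of_lt (nonOnes_le_of_good hg) hfA
    simp only [List.foldl_cons]
    rw [dfsA_eq_dfsT mat rows cols hPre hR hC fA p.1 p.2 v hg hp.1 hp.2 hb]
    exact ih (dfsT mat rows cols p.1 p.2 v)
      (dfsT_inv mat rows cols p.1 p.2 v hp.1 hp.2 hg).1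
      (fun q hq => hnn q (by simp [hq]))

lemma seedsB_nonneg (mat : List (List Int)) (rows cols : Int) :
    ∀ p ∈ (PySem.List.enumerate mat).flatMap (fun yrow =>
      ((PySem.List.enumerate yrow.2).filter (fun xval =>
        decide ((xval.2 = 1 ∧ yrow.1 = 0) ∨ yrow.1 = rows - 1 ∨ xval.1 = 0 ∨
          xval.1 = cols - 1))).map (fun xval => (xval.1, yrow.1))),
      0 ≤ p.1 ∧ 0 ≤ p.2 := by
  intro p hp
  simp only [List.mem_flatMap, List.mem_map, List.mem_filter] at hp
  obtain ⟨yrow, hyrow, xval, ⟨hxval, _⟩, rfl⟩ := hp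
  rw [PySem.List.mem_enumerate_iff] at hyrow
  obtain ⟨k, _, rfl⟩ := hyrow
  rw [PySem.List.mem_enumerate_iff] at hxval
  obtain ⟨j, _, rfl⟩ := hxval
  constructor <;> simp

-- ===== VERDICT (by name: the statement is the Claim_ definition above) =====
theorem solution_spec : Claim_equal_solution := by
  intro mat _hdom hpre
  unfold Spec_solution
  have hget0 : PySem.List.pyGetD mat 0 ([] : List Int) = mat.headD [] := by
    rw [PySem.List.pyGetD_zero]
    cases mat <;> rfl
  simp only [solution, solution_alt, hget0, PySem.List.len_eq, Int.toNat_natCast]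
  set v0 := (PySem.List.pyRange 0 (mat.length : Int) 1).map
      (fun _ => (PySem.List.pyRange 0 ((mat.headD []).length : Int) 1).map
        (fun _ => (0 : Int))) with hv0
  have hGood0 : GoodV mat.length (mat.headD []).length v0 := by
    constructor
    · rw [hv0]
      simp [PySem.List.length_pyRange_one]
    · intro r hr
      rw [hv0] at hr
      simp only [List.mem_map] at hr
      obtain ⟨_, _, rfl⟩ := hr
      simp [PySem.List.length_pyRange_one]
  have hn0 := nonOnes_le_of_good hGood0
  -- the seed list collected by an append-if fold, and B's comprehension form
  set seeds := (PySem.List.enumerate mat).foldl (fun acc yrow =>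
    (PySem.List.enumerate yrow.2).foldl (fun acc xval =>
      if (xval.2 = 1 ∧ yrow.1 = 0) ∨ yrow.1 = (mat.length : Int) - 1 ∨ xval.1 = 0 ∨
          xval.1 = ((mat.headD []).length : Int) - 1
      then acc ++ [(xval.1, yrow.1)] else acc) acc) ([] : List (Int × Int)) with hseeds
  set seedsB := (PySem.List.enumerate mat).flatMap (fun yrow =>
    ((PySem.List.enumerate yrow.2).filter (fun xval =>
      decide ((xval.2 = 1 ∧ yrow.1 = 0) ∨ yrow.1 = (mat.length : Int) - 1 ∨ xval.1 = 0 ∨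
        xval.1 = ((mat.headD []).length : Int) - 1))).map (fun xval => (xval.1, yrow.1)))
    with hseedsB
  have hseedsEq : seeds = seedsB := by
    rw [hseeds, hseedsB]
    have e := PySem.List.foldl_congr_mem (PySem.List.enumerate mat)
      (fun acc yrow => (PySem.List.enumerate yrow.2).foldl (fun acc xval =>
        if (xval.2 = 1 ∧ yrow.1 = 0) ∨ yrow.1 = (mat.length : Int) - 1 ∨ xval.1 = 0 ∨
            xval.1 = ((mat.headD []).length : Int) - 1
        then acc ++ [(xval.1, yrow.1)] else acc) acc)
      (fun acc yrow => acc ++ ((PySem.List.enumerate yrow.2).filter (fun xval =>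
        decide ((xval.2 = 1 ∧ yrow.1 = 0) ∨ yrow.1 = (mat.length : Int) - 1 ∨ xval.1 = 0 ∨
          xval.1 = ((mat.headD []).length : Int) - 1))).map (fun xval => (xval.1, yrow.1)))
      ([] : List (Int × Int))
      (fun acc yrow _ => PySem.List.foldl_append_ite _ _ _ _)
    rw [e, PySem.List.foldl_append_eq_flatMap, List.nil_append]
  have hseednn : ∀ p ∈ seeds, 0 ≤ p.1 ∧ 0 ≤ p.2 := by
    rw [hseedsEq, hseedsB]
    exact seedsB_nonneg mat _ _
  -- A's inline fold = seed-list fold of the canonical dfs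
  have h1 : (PySem.List.enumerate mat).foldl (fun v yrow =>
        (PySem.List.enumerate yrow.2).foldl (fun v xval =>
          if (xval.2 = 1 ∧ yrow.1 = 0) ∨ yrow.1 = (mat.length : Int) - 1 ∨ xval.1 = 0 ∨
              xval.1 = ((mat.headD []).length : Int) - 1
          then pvDfsA mat (mat.length : Int) ((mat.headD []).length : Int)
            (mat.length * (mat.headD []).length + 1) xval.1 yrow.1 v
          else v) v) v0
      = seeds.foldl (fun v p => pvDfsA mat (mat.length : Int) ((mat.headD []).length : Int)
          (mat.length * (mat.headD []).length + 1) p.1 p.2 v) v0 := by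
    rw [hseeds]
    exact (foldl_fuse _ _ _ (fun a acc s => foldl_filter_acc
        (fun xval : Int × Int => (xval.2 = 1 ∧ a.1 = 0) ∨ a.1 = (mat.length : Int) - 1 ∨
          xval.1 = 0 ∨ xval.1 = ((mat.headD []).length : Int) - 1)
        (fun xval => (xval.1, a.1)) _ (PySem.List.enumerate a.2) acc s)
      (PySem.List.enumerate mat) [] v0).symm
  have h2 : seeds.foldl (fun v p => pvDfsA mat (mat.length : Int) ((mat.headD []).length : Int)
        (mat.length * (mat.headD []).length + 1) p.1 p.2 v) v0
      = seeds.foldl (fun v p => dfsT mat (mat.length : Int) ((mat.headD []).length : Int)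
          p.1 p.2 v) v0 :=
    foldl_dfs_congr mat _ _ hpre rfl rfl _ (by omega) seeds v0 hGood0 hseednn
  -- B side: render the empty set, then run the loop lemma
  have hrv0 : renderS (mat.length : Int) ((mat.headD []).length : Int)
      (PySem.Set.empty : PySem.Set (Int × Int)) = v0 := by
    rw [hv0]
    unfold renderS PySem.Set.empty
    simp
  have hseedBnn : ∀ p ∈ seedsB, 0 ≤ p.1 ∧ 0 ≤ p.2 := by
    rw [hseedsB]; exact seedsB_nonneg mat _ _
  have h3 := loopB_eq mat hpre rfl rfl
    (seedsB.length + 5 * (mat.length * (mat.headD []).length) + 1) seedsB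
    (PySem.Set.empty : PySem.Set (Int × Int)) hseedBnn (by intro p hp; simp [PySem.Set.empty] at hp)
    (by rw [hrv0]; omega)
  rw [hrv0] at h3
  rw [h1, h2, hseedsEq, ← h3]
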